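-- pv_equiv track=rewrite | github.com/cristianiniguez/curso_estadistica_computacional_python | simulaciones_montecarlo/barajas.py | contar_tercias
-- ===== SOURCE A (Python) =====
-- import collections
--
-- def obtener_conteo_valores(mano):
--     valores = []
--     for carta in mano:
--         valores.append(carta[1])
--     counter = dict(collections.Counter(valores))
--     return counter
--
-- def contar_tercias(manos):
--     tercias = 0
--     for mano in manos:
--         conteo_valores = obtener_conteo_valores(mano)
--         for val in conteo_valores.values():
--             if val == 3:
--                 tercias += 1
--                 break
--     return tercias
-- ===== SOURCE B (Python) =====
-- def contar_tercias(manos):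
--     total = 0
--     for mano in manos:
--         vals = sorted(c[1] for c in mano)
--         i = 0
--         while i < len(vals):
--             j = i
--             while j < len(vals) and vals[j] == vals[i]:
--                 j += 1
--             if j - i == 3:
--                 total += 1
--                 break
--             i = j
--     return total
-- ===== Notes on version B (the rewrite author's own statement) =====
-- stated objective: alternative
-- what changed: Replaces the per-hand Counter dictionary (and the scan over its values) with sorting the hand's values and a single run-length scan over the sorted list, counting the hand when some run has length exactly 3.
import Mathlib
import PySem

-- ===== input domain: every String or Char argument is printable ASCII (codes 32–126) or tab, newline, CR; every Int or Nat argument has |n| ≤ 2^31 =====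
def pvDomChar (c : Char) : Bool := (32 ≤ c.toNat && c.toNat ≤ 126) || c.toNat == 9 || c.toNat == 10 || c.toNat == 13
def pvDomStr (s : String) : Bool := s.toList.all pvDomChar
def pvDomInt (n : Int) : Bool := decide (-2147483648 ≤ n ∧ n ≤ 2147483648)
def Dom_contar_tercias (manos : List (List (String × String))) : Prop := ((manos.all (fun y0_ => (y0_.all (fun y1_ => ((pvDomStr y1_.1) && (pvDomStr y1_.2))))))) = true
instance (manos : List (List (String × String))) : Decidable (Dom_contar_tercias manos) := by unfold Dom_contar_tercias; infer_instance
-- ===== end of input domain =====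

-- B sorts each hand's values and scans runs instead of building a Counter dict; alternative decomposition, same result.

-- ===== PORT A =====
def obtener_conteo_valores (mano : List (String × String)) : PySem.Dict String Int :=
  let valores := mano.foldl (fun acc carta => acc ++ [carta.2]) []
  PySem.Dict.counter valores

-- 'for val in …: if val == 3: tercias += 1; break' — first hit stops the scan
def buscar_tercia : List Int → Bool
  | [] => false
  | v :: rest => if v == 3 then true else buscar_tercia rest

def contar_tercias (manos : List (List (String × String))) : Int :=
  manos.foldl (fun tercias mano =>
    let conteo_valores := obtener_conteo_valores mano
    if buscar_tercia conteo_valores.values then tercias + 1 else tercias) 0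

-- ===== PORT B =====
-- inner while pair of Source B: the run starting at i is the takeWhile block; i jumps to its end (dropWhile)
def hasRun3 : List String → Bool
  | [] => false
  | x :: xs =>
    if (xs.takeWhile (fun y => y == x)).length + 1 == 3 then true
    else hasRun3 (xs.dropWhile (fun y => y == x))
termination_by s => s.length
decreasing_by
  simp only [List.length_cons]
  exact Nat.lt_succ_of_le (List.length_dropWhile_le _ _)

def contar_tercias_alt (manos : List (List (String × String))) : Int :=
  manos.foldl (fun total mano =>
    let vals := PySem.List.sorted (mano.map (fun c => c.2)) (fun x => x) false
    if hasRun3 vals then total + 1 else total) 0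

-- ===== PRECONDITION & SPEC =====
def Spec_contar_tercias (manos : List (List (String × String))) (out : Int) : Prop := out = contar_tercias_alt manos
instance (manos : List (List (String × String))) (out : Int) : Decidable (Spec_contar_tercias manos out) := by unfold Spec_contar_tercias; infer_instance

-- ===== CLAIM (what is proved, stated in full; the proofs are below) =====
def Claim_equal_contar_tercias : Prop := ∀ (manos : List (List (String × String))), Dom_contar_tercias manos → Spec_contar_tercias manos (contar_tercias manos)

-- ===== LEMMAS AND PROOFS =====

theorem buscar_tercia_eq_any (l : List Int) : buscar_tercia l = l.any (· == 3) := by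
  induction l with
  | nil => rfl
  | cons v rest ih =>
    simp only [buscar_tercia, List.any_cons]
    by_cases h : v = 3 <;> simp [h, ih]

-- A's per-hand condition: some value occurs exactly 3 times
theorem condA_iff (vals : List String) :
    buscar_tercia (PySem.Dict.counter vals).values = true ↔ ∃ k, vals.count k = 3 := by
  rw [buscar_tercia_eq_any]
  have hv : (PySem.Dict.counter vals).values
      = (PySem.Set.ofList vals).map (fun k => (vals.count k : Int)) := by
    show ((PySem.Dict.counter vals).items).map (·.2) = _
    rw [PySem.Dict.items_counter]
    simp [List.map_map, Function.comp]
  rw [hv]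
  simp only [List.any_map, List.any_eq_true, Function.comp]
  constructor
  · rintro ⟨k, _, hk⟩
    exact ⟨k, by exact_mod_cast (by simpa using hk : (vals.count k : Int) = 3)⟩
  · rintro ⟨k, hk⟩
    refine ⟨k, ?_, by simp [hk]⟩
    have : k ∈ vals := List.count_pos_iff.mp (by omega)
    simpa [PySem.Set.mem_ofList] using this

-- B's per-hand condition on a sorted list: some run (= some count) has length 3
theorem hasRun3_iff_aux : ∀ (n : Nat) (s : List String), s.length ≤ n → s.Pairwise (· ≤ ·) →
    (hasRun3 s = true ↔ ∃ k, s.count k = 3) := by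
  intro n
  induction n with
  | zero =>
    intro s hlen _
    have : s = [] := List.eq_nil_of_length_eq_zero (Nat.le_zero.mp hlen)
    subst this
    simp [hasRun3]
  | succ n ihn =>
    intro s hlen hs
    cases s with
    | nil => simp [hasRun3]
    | cons x xs =>
      have hsplit : xs = xs.takeWhile (fun y => y == x) ++ xs.dropWhile (fun y => y == x) :=
        (List.takeWhile_append_dropWhile).symm
      set t := xs.takeWhile (fun y => y == x) with ht
      set d := xs.dropWhile (fun y => y == x) with hd
      have htx : ∀ y ∈ t, y = x := by
        intro y hy
        have := List.mem_takeWhile_imp hy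
        simpa using this
      have hxle : ∀ y ∈ xs, x ≤ y := by
        intro y hy; exact (List.pairwise_cons.mp hs).1 y hy
      have hdp : d.Pairwise (· ≤ ·) := by
        have := (List.pairwise_cons.mp hs).2
        rw [hsplit] at this
        exact this.sublist (List.sublist_append_right _ _)
      have hdlen : d.length ≤ n := by
        have h1 : d.length ≤ xs.length := List.length_dropWhile_le _ _
        have h2 : xs.length + 1 ≤ n + 1 := by simpa using hlen
        omega
      have ih := ihn d hdlen hdp
      have hxd : x ∉ d := by
        intro hxmem
        cases hhead : d with
        | nil => simp [hhead] at hxmem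
        | cons h tl =>
          have hne : ¬ (h == x) = true := by
            have := List.head?_dropWhile_not (fun y => y == x) xs
            rw [← hd, hhead] at this
            simpa using this
          have hne' : h ≠ x := by simpa using hne
          have hhx : x ≤ h := hxle h (by rw [hsplit, hhead]; simp)
          rw [hhead] at hxmem
          rcases List.mem_cons.mp hxmem with rfl | hxtl
          · exact hne' rfl
          · have : h ≤ x := by
              rw [hhead] at hdp
              exact (List.pairwise_cons.mp hdp).1 x hxtl
            exact hne' (le_antisymm this hhx)
      have hcx : (x :: xs).count x = t.length + 1 := by
        have hcd : d.count x = 0 := List.count_eq_zero.mpr hxd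
        have hct : t.count x = t.length :=
          List.count_eq_length.mpr (fun y hy => ((htx y hy) ▸ rfl))
        rw [List.count_cons_self, hsplit, List.count_append, hct, hcd]
      have hck : ∀ k, k ≠ x → (x :: xs).count k = d.count k := by
        intro k hk
        have hct : t.count k = 0 :=
          List.count_eq_zero.mpr (fun hmem => hk (htx k hmem))
        rw [hsplit]
        simp [List.count_cons, List.count_append, hct]
        exact fun h => hk h.symm
      rw [hasRun3]
      by_cases hlen3 : t.length + 1 = 3
      · simp only [← ht, hlen3]
        constructor
        · intro _; exact ⟨x, by rw [hcx, hlen3]⟩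
        · intro _; simp
      · have hni : ¬ ((xs.takeWhile (fun y => y == x)).length + 1 == 3) = true := by
          simpa [← ht] using hlen3
        rw [if_neg hni, ih]
        constructor
        · rintro ⟨k, hk⟩
          have hkx : k ≠ x := by
            intro h'; subst h'
            exact hxd (List.count_pos_iff.mp (by omega))
          exact ⟨k, by rw [hck k hkx]; exact hk⟩
        · rintro ⟨k, hk⟩
          by_cases hkx : k = x
          · subst hkx; rw [hcx] at hk; omega
          · exact ⟨k, by rw [← hck k hkx]; exact hk⟩

theorem hasRun3_iff (s : List String) (hs : s.Pairwise (· ≤ ·)) :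
    hasRun3 s = true ↔ ∃ k, s.count k = 3 :=
  hasRun3_iff_aux s.length s (le_refl _) hs

theorem hand_cond_eq (mano : List (String × String)) :
    buscar_tercia (obtener_conteo_valores mano).values
      = hasRun3 (PySem.List.sorted (mano.map (fun c => c.2)) (fun x => x) false) := by
  have hvals : mano.foldl (fun acc carta => acc ++ [carta.2]) [] = mano.map (fun c => c.2) := by
    simpa using PySem.List.foldl_append_singleton_eq_map (l := mano) (f := fun c => c.2) (acc := [])
  set vals := mano.map (fun c => c.2) with hv
  set s := PySem.List.sorted vals (fun x => x) false with hsdef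
  have hperm : s.Perm vals := PySem.List.sorted_perm _ _ _
  have hpw : s.Pairwise (· ≤ ·) := by
    simpa using PySem.List.sorted_pairwise (xs := vals) (key := fun x => x)
  have hA : buscar_tercia (obtener_conteo_valores mano).values = true ↔ ∃ k, vals.count k = 3 := by
    unfold obtener_conteo_valores
    rw [hvals]
    exact condA_iff vals
  have hB : hasRun3 s = true ↔ ∃ k, vals.count k = 3 := by
    rw [hasRun3_iff s hpw]
    constructor <;> rintro ⟨k, hk⟩ <;> exact ⟨k, by rw [← hk]; exact (hperm.count_eq k).symm ▸ rfl⟩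
  exact Bool.eq_iff_iff.mpr (hA.trans hB.symm)

-- ===== VERDICT (by name: the statement is the Claim_ definition above) =====
theorem contar_tercias_spec : Claim_equal_contar_tercias := by
  intro manos _
  unfold Spec_contar_tercias contar_tercias contar_tercias_alt
  apply PySem.List.foldl_congr_mem
  intro acc mano _
  simp only [hand_cond_eq mano]
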